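-- pv_equiv track=rewrite | github.com/Gowtham1906/DQLabs | infra/airflow/dags/dqlabs/app_helper/sql_group_parse.py | _find_keyword_at_top_level
-- ===== SOURCE A (Python) =====
-- def _find_keyword_at_top_level(query: str, keyword: str, start_pos: int = 0) -> int:
--     """
--     Find a SQL keyword at the top level (not inside parentheses).
--     Returns the position of the keyword, or -1 if not found.
--     """
--     query_upper = query.upper()
--     paren_depth = 0
--     pos = start_pos
--
--     while pos < len(query):
--         char = query[pos]
--
--         if char == '(':
--             paren_depth += 1
--         elif char == ')':
--             paren_depth -= 1
--         elif paren_depth == 0: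
--             # We're at the top level, check for keyword
--             remaining = query_upper[pos:]
--             if remaining.startswith(keyword):
--                 # Check word boundary
--                 if pos == 0 or not query[pos-1].isalnum():
--                     end_pos = pos + len(keyword)
--                     if end_pos >= len(query) or not query[end_pos].isalnum():
--                         return pos
--
--         pos += 1
--
--     return -1
-- ===== SOURCE B (Python) =====
-- import re
--
-- def _find_keyword_at_top_level(query: str, keyword: str, start_pos: int = 0) -> int:
--     """Candidate-first search: find every occurrence of the keyword in the
--     uppercased query with one regex lookahead scan, then keep the first one
--     that sits at paren depth 0 (counted from start_pos) with non-alnum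
--     word boundaries on both sides."""
--     query_upper = query.upper()
--     n = len(query)
--     k = len(keyword)
--     pattern = re.compile('(?=' + re.escape(keyword) + ')')
--     for m in pattern.finditer(query_upper, start_pos):
--         p = m.start()
--         if p >= n or query[p] in '()':
--             continue
--         seg = query[start_pos:p]
--         if seg.count('(') != seg.count(')'):
--             continue
--         if p > 0 and query[p - 1].isalnum():
--             continue
--         e = p + k
--         if e < n and query[e].isalnum():
--             continue
--         return p
--     return -1
-- ===== Notes on version B (the rewrite author's own statement) =====
-- stated objective: alternative
-- what changed: B enumerates keyword occurrences first (one regex lookahead scan of the uppercased query) and then checks each candidate's paren depth (substring counts from start_pos) and word boundaries, instead of A's per-character scan that carries a running depth and tests the keyword at every character.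
-- outside the precondition, e.g. on _find_keyword_at_top_level('a FROM b', 'FROM', -6): A returns -6, B returns 2; on _find_keyword_at_top_level('', 'X', -1): A raises IndexError, B returns -1
import Mathlib
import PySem

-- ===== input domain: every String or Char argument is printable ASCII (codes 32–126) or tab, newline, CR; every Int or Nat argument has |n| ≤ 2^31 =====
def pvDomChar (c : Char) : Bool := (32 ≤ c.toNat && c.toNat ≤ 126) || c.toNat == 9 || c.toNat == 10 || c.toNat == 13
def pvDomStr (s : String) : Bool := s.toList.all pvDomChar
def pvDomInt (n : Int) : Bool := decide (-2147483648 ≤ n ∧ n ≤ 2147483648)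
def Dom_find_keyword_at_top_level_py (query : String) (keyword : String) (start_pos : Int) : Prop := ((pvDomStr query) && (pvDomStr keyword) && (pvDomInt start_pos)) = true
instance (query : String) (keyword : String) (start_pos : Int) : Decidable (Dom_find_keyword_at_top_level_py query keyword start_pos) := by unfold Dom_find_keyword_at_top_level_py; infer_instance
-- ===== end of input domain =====

-- B re-implements the search candidate-first (enumerate keyword occurrences, then check paren depth and
-- word boundaries) instead of A's char-by-char scan; equal return values are proved for 0 ≤ start_pos.

-- ===== PORT A =====
-- A's while-loop: pos and paren_depth carried along, fuel = number of remaining loop iterations.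
-- Where Python raises IndexError (query[pos] with pos < -len) the port returns -1; those inputs are outside Pre_.
def pvLoopA (cs us kw : List Char) : Nat → Int → Int → Int
  | 0, _, _ => -1
  | fuel+1, pos, depth =>
    if pos < (cs.length : Int) then
      match PySem.List.pyGet? cs pos with
      | none => -1   -- Python raises IndexError here (pos < -len); excluded by Pre_
      | some char =>
        if char = '(' then pvLoopA cs us kw fuel (pos+1) (depth+1)
        else if char = ')' then pvLoopA cs us kw fuel (pos+1) (depth-1)
        else if depth = 0 ∧
                PySem.Chars.startswith (PySem.List.slice us (some pos) none) kw = true ∧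
                (pos = 0 ∨ PySem.Chars.isalnum (PySem.List.pyGetD cs (pos-1) ' ') = false) ∧
                ((cs.length : Int) ≤ pos + (kw.length : Int) ∨
                 PySem.Chars.isalnum (PySem.List.pyGetD cs (pos + (kw.length : Int)) ' ') = false)
        then pos
        else pvLoopA cs us kw fuel (pos+1) depth
    else -1

def find_keyword_at_top_level_py (query : String) (keyword : String) (start_pos : Int) : Int :=
  let cs := query.toList
  let us := PySem.Chars.upper cs
  pvLoopA cs us keyword.toList ((cs.length : Int) - start_pos).toNat start_pos 0

-- ===== PORT B =====
-- 'm.start() is a regex match of the keyword in query_upper at position p' (the finditer of the lookahead,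
-- which clamps a negative start position to 0, like re does):
def pvIsCand (us kw : List Char) (p : Int) : Bool :=
  PySem.Chars.startswith (PySem.List.slice us (some p) none) kw

-- the body of B's for-loop: the candidate qualifies (none of the 'continue's fire)
def pvOk (cs kw : List Char) (start p : Int) : Bool :=
  decide (p < (cs.length : Int)) &&
  (!((PySem.List.pyGetD cs p ' ') == '(' || (PySem.List.pyGetD cs p ' ') == ')')) &&
  ((PySem.List.slice cs (some start) (some p)).count '(' == (PySem.List.slice cs (some start) (some p)).count ')') &&
  (!(decide (0 < p) && PySem.Chars.isalnum (PySem.List.pyGetD cs (p-1) ' '))) &&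
  (!(decide (p + (kw.length : Int) < (cs.length : Int)) && PySem.Chars.isalnum (PySem.List.pyGetD cs (p + (kw.length : Int)) ' ')))

def find_keyword_at_top_level_py_alt (query : String) (keyword : String) (start_pos : Int) : Int :=
  let cs := query.toList
  let us := PySem.Chars.upper cs
  let kw := keyword.toList
  match ((PySem.List.pyRange (max start_pos 0) ((cs.length : Int) + 1) 1).filter (pvIsCand us kw)).find?
          (pvOk cs kw start_pos) with
  | some p => p
  | none => -1

-- ===== PRECONDITION & SPEC =====
-- Pre_ restricts to the natural domain 0 ≤ start_pos: for negative start_pos A scans through Python's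
-- negative-index wraparound (an accident of indexing, not a position in the query), and raises IndexError
-- once an index falls below -len(query) (e.g. it raises on ('', 'X', -1)); B does not mimic either.
def Pre_find_keyword_at_top_level_py (query : String) (keyword : String) (start_pos : Int) : Prop :=
  0 ≤ start_pos
instance (query : String) (keyword : String) (start_pos : Int) : Decidable (Pre_find_keyword_at_top_level_py query keyword start_pos) := by unfold Pre_find_keyword_at_top_level_py; infer_instance

def pvWitness_find_keyword_at_top_level_py : String × String × Int := ("a FROM (x WHERE y) b", "WHERE", 0)

def Spec_find_keyword_at_top_level_py (query : String) (keyword : String) (start_pos : Int) (out : Int) : Prop := out = find_keyword_at_top_level_py_alt query keyword start_pos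
instance (query : String) (keyword : String) (start_pos : Int) (out : Int) : Decidable (Spec_find_keyword_at_top_level_py query keyword start_pos out) := by unfold Spec_find_keyword_at_top_level_py; infer_instance

-- ===== CLAIM (what is proved, stated in full; the proofs are below) =====
def Claim_equal_find_keyword_at_top_level_py : Prop := ∀ (query : String) (keyword : String) (start_pos : Int), Dom_find_keyword_at_top_level_py query keyword start_pos → Pre_find_keyword_at_top_level_py query keyword start_pos → Spec_find_keyword_at_top_level_py query keyword start_pos (find_keyword_at_top_level_py query keyword start_pos)

-- ===== LEMMAS AND PROOFS =====

-- find? over a filtered list is find? of the conjunction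
lemma pv_find?_filter {α : Type} (l : List α) (f g : α → Bool) :
    (l.filter f).find? g = l.find? (fun x => f x && g x) := by
  induction l with
  | nil => rfl
  | cons x xs ih =>
    by_cases hf : f x = true
    · by_cases hg : g x = true
      · simp [List.filter_cons, hf, List.find?_cons, hg]
      · simp [List.filter_cons, hf, List.find?_cons, hg, ih,
          Bool.eq_false_iff.mpr hg]
    · simp [List.filter_cons, hf, List.find?_cons, ih, Bool.eq_false_iff.mpr hf]

-- no qualifying candidate at or beyond the end of the query
lemma pv_find?_none_of_ge (cs us kw : List Char) (start pos : Int)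
    (h : (cs.length : Int) ≤ pos) :
    (PySem.List.pyRange pos ((cs.length : Int) + 1) 1).find?
      (fun p => pvIsCand us kw p && pvOk cs kw start p) = none := by
  apply List.find?_eq_none.mpr
  intro p hp
  have hmem := (PySem.List.mem_pyRange_one).mp hp
  simp only [pvOk, Bool.and_eq_true, decide_eq_true_eq, Bool.not_eq_true']
  intro hcontra
  have := hcontra.2.1.1.1.1
  omega

-- appending the pos-th character to the slice [start:pos]
lemma pv_slice_snoc (cs : List Char) (start pos : Int)
    (h0 : 0 ≤ start) (hsp : start ≤ pos) (hp : pos < (cs.length : Int)) :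
    PySem.List.slice cs (some start) (some (pos + 1)) =
      PySem.List.slice cs (some start) (some pos) ++ [cs[pos.toNat]'(by omega)] := by
  rw [PySem.List.slice_toNat cs h0 (by omega : (0:Int) ≤ pos + 1),
      PySem.List.slice_toNat cs h0 (by omega : (0:Int) ≤ pos)]
  have ha : start.toNat ≤ pos.toNat := by omega
  have hb : (pos + 1).toNat = pos.toNat + 1 := by omega
  rw [hb, Nat.succ_sub ha, List.take_succ]
  congr 1
  have hget : (cs.drop start.toNat)[pos.toNat - start.toNat]? = some (cs[pos.toNat]'(by omega)) := by
    have hidx : start.toNat + (pos.toNat - start.toNat) = pos.toNat := by omega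
    rw [List.getElem?_drop, hidx, List.getElem?_eq_getElem (by omega)]
  simp [hget]


-- the A-side loop, started at any pos with the correct running depth, computes B's candidate-first answer
lemma pv_loop_eq (cs us kw : List Char) (start : Int) (hs : 0 ≤ start) :
    ∀ (fuel : Nat) (pos depth : Int), start ≤ pos →
    (cs.length : Int) ≤ pos + fuel →
    depth = ((PySem.List.slice cs (some start) (some pos)).count '(' : Int)
            - ((PySem.List.slice cs (some start) (some pos)).count ')' : Int) →
    pvLoopA cs us kw fuel pos depth =
      (match (PySem.List.pyRange pos ((cs.length : Int) + 1) 1).find?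
              (fun p => pvIsCand us kw p && pvOk cs kw start p) with
       | some p => p | none => -1) := by
  intro fuel
  induction fuel with
  | zero =>
    intro pos depth hsp hfuel hd
    rw [pv_find?_none_of_ge cs us kw start pos (by omega)]
    simp [pvLoopA]
  | succ fuel ih =>
    intro pos depth hsp hfuel hd
    by_cases hlt : pos < (cs.length : Int)
    · have h0p : 0 ≤ pos := le_trans hs hsp
      have hget := PySem.List.pyGet?_eq_some_getElem cs h0p hlt
      have hgetD := PySem.List.pyGetD_eq_getElem cs ' ' h0p hlt
      have hsnoc := pv_slice_snoc cs start pos hs hsp hlt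
      have hpeel : PySem.List.pyRange pos ((cs.length : Int) + 1) 1 =
          pos :: PySem.List.pyRange (pos + 1) ((cs.length : Int) + 1) 1 :=
        PySem.List.pyRange_one_cons (by omega)
      simp only [pvLoopA, if_pos hlt, hget]
      by_cases hc1 : cs[pos.toNat] = '('
      · rw [if_pos hc1]
        have hq : (pvIsCand us kw pos && pvOk cs kw start pos) = false := by
          simp [pvOk, hgetD, hc1]
        rw [hpeel, List.find?_cons]
        simp only [hq, cond_false]
        apply ih (pos + 1) (depth + 1) (by omega) (by omega)
        rw [hsnoc]
        simp only [List.count_append, hc1]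
        push_cast
        simp [List.count_singleton, hc1]
        omega
      · by_cases hc2 : cs[pos.toNat] = ')'
        · rw [if_neg hc1, if_pos hc2]
          have hq : (pvIsCand us kw pos && pvOk cs kw start pos) = false := by
            simp [pvOk, hgetD, hc2]
          rw [hpeel, List.find?_cons]
          simp only [hq, cond_false]
          apply ih (pos + 1) (depth - 1) (by omega) (by omega)
          rw [hsnoc]
          simp only [List.count_append]
          push_cast
          simp [List.count_singleton, hc1, hc2]
          omega
        · rw [if_neg hc1, if_neg hc2]
          by_cases hcond : depth = 0 ∧
              PySem.Chars.startswith (PySem.List.slice us (some pos) none) kw = true ∧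
              (pos = 0 ∨ PySem.Chars.isalnum (PySem.List.pyGetD cs (pos-1) ' ') = false) ∧
              ((cs.length : Int) ≤ pos + (kw.length : Int) ∨
               PySem.Chars.isalnum (PySem.List.pyGetD cs (pos + (kw.length : Int)) ' ') = false)
          · rw [if_pos hcond]
            obtain ⟨hdep, hsw, hb1, hb2⟩ := hcond
            have hcnt : (PySem.List.slice cs (some start) (some pos)).count '(' =
                (PySem.List.slice cs (some start) (some pos)).count ')' := by omega
            have hq : (pvIsCand us kw pos && pvOk cs kw start pos) = true := by
              simp only [pvIsCand, pvOk, Bool.and_eq_true, decide_eq_true_eq,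
                Bool.not_eq_true', Bool.and_eq_false_iff, decide_eq_false_iff_not,
                Bool.or_eq_false_iff, beq_eq_false_iff_ne, ne_eq, beq_iff_eq]
              refine ⟨hsw, ⟨⟨⟨hlt, ?_⟩, hcnt⟩, ?_⟩, ?_⟩
              · rw [hgetD]; exact ⟨hc1, hc2⟩
              · rcases hb1 with h | h
                · left; omega
                · right; exact h
              · rcases hb2 with h | h
                · left; omega
                · right; exact h
            rw [hpeel, List.find?_cons]
            simp [hq]
          · rw [if_neg hcond]
            have hq : (pvIsCand us kw pos && pvOk cs kw start pos) = false := by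
              apply Bool.eq_false_iff.mpr
              intro htrue
              apply hcond
              simp only [pvIsCand, pvOk, Bool.and_eq_true, decide_eq_true_eq,
                Bool.not_eq_true', Bool.and_eq_false_iff, decide_eq_false_iff_not,
                Bool.or_eq_false_iff, beq_eq_false_iff_ne, ne_eq, beq_iff_eq] at htrue
              obtain ⟨hsw, ⟨⟨⟨_, _⟩, hcnt⟩, hb1⟩, hb2⟩ := htrue
              refine ⟨by omega, hsw, ?_, ?_⟩
              · rcases hb1 with h | h
                · left; omega
                · right; exact h
              · rcases hb2 with h | h
                · left; omega
                · right; exact h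
            rw [hpeel, List.find?_cons]
            simp only [hq, cond_false]
            apply ih (pos + 1) depth (by omega) (by omega)
            rw [hsnoc]
            simp only [List.count_append]
            push_cast
            simp [List.count_singleton, hc1, hc2]
            omega
    · rw [pv_find?_none_of_ge cs us kw start pos (by omega)]
      simp [pvLoopA, hlt]

-- ===== VERDICT (by name: the statement is the Claim_ definition above) =====
theorem find_keyword_at_top_level_py_spec : Claim_equal_find_keyword_at_top_level_py := by
  unfold Claim_equal_find_keyword_at_top_level_py
  intro query keyword start_pos _ hpre
  unfold Spec_find_keyword_at_top_level_py
  unfold Pre_find_keyword_at_top_level_py at hpre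
  unfold find_keyword_at_top_level_py find_keyword_at_top_level_py_alt
  simp only []
  rw [pv_find?_filter, max_eq_left hpre]
  apply pv_loop_eq _ _ _ _ hpre _ _ 0 le_rfl (by omega)
  rw [PySem.List.slice_toNat query.toList hpre hpre]
  simp
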